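-- pv_equiv track=rewrite | github.com/floor-licker/qalia | core/session/manager.py | _extract_user_journeys
-- ===== SOURCE A (Python) =====
-- def _extract_user_journeys(action_history: list) -> dict:
--     """Extract logical user journeys from action sequence - generic grouping only."""
--     journeys = {}
--     current_journey = []
--     journey_count = 1
--     journey_name = "Initial_Exploration"
--
--     for i, action in enumerate(action_history):
--         action_text = action.get('action', {}).get('text', '').upper()
--         element_type = action.get('action', {}).get('element_type', '')
--
--         # Start new journey on significant navigation (links) or major UI changes
--         # Use generic criteria instead of hardcoded keywords
--         is_navigation = element_type == 'link' and len(action_text) > 0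
--         is_major_interaction = element_type == 'button' and len(action_text) > 3
--         is_journey_boundary = (i > 0 and i % 10 == 0)  # Every 10 actions as fallback grouping
--
--         if is_navigation or is_major_interaction or is_journey_boundary:
--             if current_journey:
--                 journeys[journey_name] = current_journey
--
--             # Generic journey naming - let LLM interpret the actual purpose
--             if is_navigation:
--                 journey_name = f"Navigation_Sequence_{journey_count}"
--             elif is_major_interaction:
--                 journey_name = f"Interaction_Sequence_{journey_count}"
--             else:
--                 journey_name = f"Action_Sequence_{journey_count}"
--
--             journey_count += 1
--             current_journey = []
--
--         current_journey.append(action)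
--
--     # Add final journey
--     if current_journey:
--         journeys[journey_name] = current_journey
--
--     return journeys
-- ===== SOURCE B (Python) =====
-- def _extract_user_journeys(action_history: list) -> dict:
--     """Segment-splitting re-implementation: classify each index's boundary type,
--     cut the history into whole segments recursively, then build the dict from
--     the (name, segment) pairs in one go."""
--
--     def boundary(i, action):
--         inner = action.get('action', {})
--         text = inner.get('text', '').upper()
--         element_type = inner.get('element_type', '')
--         if element_type == 'link' and len(text) > 0:
--             return 'Navigation'
--         if element_type == 'button' and len(text) > 3:
--             return 'Interaction'
--         if i > 0 and i % 10 == 0: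
--             return 'Action'
--         return None
--
--     def split_segment(i, actions):
--         """Longest prefix of actions (starting at global index i) with no boundary."""
--         seg = []
--         k = 0
--         while k < len(actions) and boundary(i + k, actions[k]) is None:
--             seg.append(actions[k])
--             k += 1
--         return seg, actions[k:]
--
--     def build(i, name, count, actions):
--         """actions is non-empty and its head (at index i) starts segment `name`."""
--         head, rest = actions[0], actions[1:]
--         s, tail = split_segment(i + 1, rest)
--         seg = [head] + s
--         if not tail:
--             return [(name, seg)]
--         b = boundary(i + len(seg), tail[0])
--         return [(name, seg)] + build(i + len(seg), f"{b}_Sequence_{count}", count + 1, tail)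
--
--     if not action_history:
--         pairs = []
--     else:
--         b0 = boundary(0, action_history[0])
--         if b0 is None:
--             pairs = build(0, "Initial_Exploration", 1, action_history)
--         else:
--             pairs = build(0, f"{b0}_Sequence_1", 2, action_history)
--     return dict(pairs)
-- ===== Notes on version B (the rewrite author's own statement) =====
-- stated objective: alternative
-- what changed: B replaces A's element-by-element accumulator loop (mutable current journey, counter and name threaded through one pass) with a segment-splitting decomposition: a boundary classifier per index, a recursive cutter that peels off one whole boundary-free segment at a time, and a single dict built from the resulting (name, segment) pairs.
import Mathlib
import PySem

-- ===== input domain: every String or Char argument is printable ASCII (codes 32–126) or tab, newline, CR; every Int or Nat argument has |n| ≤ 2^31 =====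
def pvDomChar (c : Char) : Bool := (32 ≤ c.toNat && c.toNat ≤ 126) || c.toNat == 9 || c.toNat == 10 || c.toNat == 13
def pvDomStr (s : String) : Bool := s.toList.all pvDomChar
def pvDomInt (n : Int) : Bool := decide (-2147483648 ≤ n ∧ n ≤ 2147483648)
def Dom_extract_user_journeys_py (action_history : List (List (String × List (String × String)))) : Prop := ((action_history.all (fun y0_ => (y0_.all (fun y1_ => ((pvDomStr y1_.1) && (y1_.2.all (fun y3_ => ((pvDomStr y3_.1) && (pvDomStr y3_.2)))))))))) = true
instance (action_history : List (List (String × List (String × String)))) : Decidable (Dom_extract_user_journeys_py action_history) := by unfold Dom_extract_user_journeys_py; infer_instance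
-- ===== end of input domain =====

-- B re-implements A by cutting the history into whole segments recursively (boundary classification
-- + segment splitting + one dict build) instead of A's element-by-element accumulator loop;
-- objective: alternative decomposition, same cost.

-- an "action" is a dict String -> dict String String, as an association list
abbrev PvAct : Type := List (String × List (String × String))

-- ===== PORT A =====
-- the for-loop of A as the obvious structural recursion over the same state
-- (journeys, current_journey, journey_count, journey_name)
def pvLoopA : Nat → List PvAct → PySem.Dict String (List PvAct) → List PvAct → Int → String →
    PySem.Dict String (List PvAct)
  | _, [], journeys, current, _, name =>
      if current.isEmpty then journeys else journeys.insert name current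
  | i, a :: rest, journeys, current, cnt, name =>
      let inner := (PySem.Dict.mk a).getD "action" []
      let action_text := PySem.Str.upper ((PySem.Dict.mk inner).getD "text" "")
      let element_type := (PySem.Dict.mk inner).getD "element_type" ""
      let is_navigation := element_type == "link" && decide (PySem.Str.len action_text > 0)
      let is_major_interaction := element_type == "button" && decide (PySem.Str.len action_text > 3)
      let is_journey_boundary := decide (i > 0) && decide (i % 10 = 0)
      if is_navigation || is_major_interaction || is_journey_boundary then
        let journeys' := if current.isEmpty then journeys else journeys.insert name current
        let name' :=
          if is_navigation then "Navigation_Sequence_" ++ PySem.Int.toStr cnt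
          else if is_major_interaction then "Interaction_Sequence_" ++ PySem.Int.toStr cnt
          else "Action_Sequence_" ++ PySem.Int.toStr cnt
        pvLoopA (i + 1) rest journeys' [a] (cnt + 1) name'
      else
        pvLoopA (i + 1) rest journeys (current ++ [a]) cnt name

def extract_user_journeys_py (action_history : List (List (String × List (String × String)))) :
    List (String × List (List (String × List (String × String)))) :=
  (pvLoopA 0 action_history PySem.Dict.empty [] 1 "Initial_Exploration").items

-- ===== PORT B =====
-- boundary(i, action): which kind of journey boundary index i is, if any
def pvBoundary (i : Nat) (a : PvAct) : Option String :=
  let inner := (PySem.Dict.mk a).getD "action" []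
  let text := PySem.Str.upper ((PySem.Dict.mk inner).getD "text" "")
  let element_type := (PySem.Dict.mk inner).getD "element_type" ""
  if element_type == "link" && decide (PySem.Str.len text > 0) then some "Navigation"
  else if element_type == "button" && decide (PySem.Str.len text > 3) then some "Interaction"
  else if decide (i > 0) && decide (i % 10 = 0) then some "Action"
  else none

-- split_segment(i, actions): longest boundary-free prefix, and the rest
def pvSplitSeg : Nat → List PvAct → List PvAct × List PvAct
  | _, [] => ([], [])
  | i, a :: rest =>
      if (pvBoundary i a).isSome then ([], a :: rest)
      else (a :: (pvSplitSeg (i + 1) rest).1, (pvSplitSeg (i + 1) rest).2)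

-- termination measure for pvBuild (the port recurses on the returned tail)
theorem pvSplitSeg_snd_length (i : Nat) (xs : List PvAct) :
    (pvSplitSeg i xs).2.length ≤ xs.length := by
  induction xs generalizing i with
  | nil => simp [pvSplitSeg]
  | cons a rest ih =>
      rw [pvSplitSeg]; split
      · simp
      · simpa using Nat.le_succ_of_le (ih (i + 1))

-- f"{b}_Sequence_{count}" (b is always some: build recurses only when the tail's head is a boundary)
def pvName (b : Option String) (cnt : Int) : String := b.getD "" ++ "_Sequence_" ++ PySem.Int.toStr cnt

-- build(i, name, count, actions): the (name, segment) pairs; only ever called on non-empty actions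
def pvBuild : Nat → String → Int → List PvAct → List (String × List PvAct)
  | _, _, _, [] => []
  | i, name, cnt, a :: rest =>
      let p := pvSplitSeg (i + 1) rest
      let seg := a :: p.1
      match p.2 with
      | [] => [(name, seg)]
      | b :: _ =>
          (name, seg) :: pvBuild (i + seg.length) (pvName (pvBoundary (i + seg.length) b) cnt) (cnt + 1) p.2
  termination_by _ _ _ xs => xs.length
  decreasing_by
    have := pvSplitSeg_snd_length (i + 1) rest
    simp_all

def extract_user_journeys_py_alt (action_history : List (List (String × List (String × String)))) :
    List (String × List (List (String × List (String × String)))) :=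
  let pairs : List (String × List PvAct) :=
    match action_history with
    | [] => []
    | a :: _ =>
        match pvBoundary 0 a with
        | none => pvBuild 0 "Initial_Exploration" 1 action_history
        | some b0 => pvBuild 0 (b0 ++ "_Sequence_" ++ PySem.Int.toStr 1) 2 action_history
  (pairs.foldl (fun d p => d.insert p.1 p.2) (PySem.Dict.empty : PySem.Dict String (List PvAct))).items

-- ===== PRECONDITION & SPEC =====
def Spec_extract_user_journeys_py (action_history : List (List (String × List (String × String)))) (out : List (String × List (List (String × List (String × String))))) : Prop := out = extract_user_journeys_py_alt action_history
-- (the one-shot `infer_instance` overruns the default instance-search size on this nested type,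
-- so the same instance is assembled stepwise)
instance (action_history : List (List (String × List (String × String)))) (out : List (String × List (List (String × List (String × String))))) : Decidable (Spec_extract_user_journeys_py action_history out) := by
  unfold Spec_extract_user_journeys_py
  letI d1 : DecidableEq (List (String × List (String × String))) := inferInstance
  letI d2 : DecidableEq (List (List (String × List (String × String)))) := inferInstance
  letI d3 : DecidableEq (String × List (List (String × List (String × String)))) := inferInstance
  letI d4 : DecidableEq (List (String × List (List (String × List (String × String))))) := inferInstance
  exact d4 _ _

-- ===== CLAIM (what is proved, stated in full; the proofs are below) =====
def Claim_equal_extract_user_journeys_py : Prop := ∀ (action_history : List (List (String × List (String × String)))), Dom_extract_user_journeys_py action_history → Spec_extract_user_journeys_py action_history (extract_user_journeys_py action_history)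

-- ===== LEMMAS AND PROOFS =====

-- proof helper: B's pair list when the current (non-empty) segment `cur` is still open,
-- with the remaining actions xs starting at global index i
def pvBuildCont (i : Nat) (name : String) (cnt : Int) (cur : List PvAct) (xs : List PvAct) :
    List (String × List PvAct) :=
  match (pvSplitSeg i xs).2 with
  | [] => [(name, cur ++ (pvSplitSeg i xs).1)]
  | b :: _ =>
      (name, cur ++ (pvSplitSeg i xs).1) ::
        pvBuild (i + (pvSplitSeg i xs).1.length)
          (pvName (pvBoundary (i + (pvSplitSeg i xs).1.length) b) cnt) (cnt + 1) (pvSplitSeg i xs).2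

theorem pvBuild_cons (i : Nat) (name : String) (cnt : Int) (a : PvAct) (rest : List PvAct) :
    pvBuild i name cnt (a :: rest) = pvBuildCont (i + 1) name cnt [a] rest := by
  rw [pvBuild.eq_def, pvBuildCont]
  rcases h : (pvSplitSeg (i + 1) rest).2 with _ | ⟨b, t⟩ <;>
    simp [h, List.length_cons, Nat.add_comm, Nat.add_assoc]

-- A's cons step, re-expressed through B's pvBoundary
theorem pvLoopA_cons (i : Nat) (a : PvAct) (rest : List PvAct)
    (J : PySem.Dict String (List PvAct)) (cur : List PvAct) (cnt : Int) (name : String) :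
    pvLoopA i (a :: rest) J cur cnt name =
      match pvBoundary i a with
      | some t =>
          pvLoopA (i + 1) rest (if cur.isEmpty then J else J.insert name cur) [a] (cnt + 1)
            (pvName (some t) cnt)
      | none => pvLoopA (i + 1) rest J (cur ++ [a]) cnt name := by
  have e1 : ("Navigation" : String) ++ "_Sequence_" = "Navigation_Sequence_" := rfl
  have e2 : ("Interaction" : String) ++ "_Sequence_" = "Interaction_Sequence_" := rfl
  have e3 : ("Action" : String) ++ "_Sequence_" = "Action_Sequence_" := rfl
  rw [pvLoopA, pvBoundary]
  set inner := (PySem.Dict.mk a).getD "action" [] with hinner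
  set text := PySem.Str.upper ((PySem.Dict.mk inner).getD "text" "") with htext
  set et := (PySem.Dict.mk inner).getD "element_type" "" with het
  set b1 := et == "link" && decide (PySem.Str.len text > 0) with hb1
  set b2 := et == "button" && decide (PySem.Str.len text > 3) with hb2
  set b3 := decide (i > 0) && decide (i % 10 = 0) with hb3
  clear_value b1 b2 b3
  cases b1 <;> cases b2 <;> cases b3 <;>
    simp [pvName, e1, e2, e3]

def pvIns (d : PySem.Dict String (List PvAct)) (p : String × List PvAct) :
    PySem.Dict String (List PvAct) := d.insert p.1 p.2

-- the key invariant: A's loop, run from a non-empty open segment, performs exactly the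
-- inserts of B's remaining (name, segment) pairs, in order
theorem pvLoop_eq_foldl (xs : List PvAct) : ∀ (i : Nat) (J : PySem.Dict String (List PvAct))
    (cur : List PvAct), cur ≠ [] → ∀ (cnt : Int) (name : String),
    pvLoopA i xs J cur cnt name = (pvBuildCont i name cnt cur xs).foldl pvIns J := by
  induction xs with
  | nil =>
      intro i J cur hc cnt name
      simp [pvLoopA, pvBuildCont, pvSplitSeg, List.isEmpty_iff, hc, pvIns]
  | cons a rest ih =>
      intro i J cur hc cnt name
      rw [pvLoopA_cons]
      rcases hb : pvBoundary i a with _ | t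
      · -- no boundary: a joins the open segment
        rw [ih (i + 1) J (cur ++ [a]) (by simp) cnt name]
        rw [pvBuildCont, pvBuildCont]
        simp only [pvSplitSeg, hb, Option.isSome_none, Bool.false_eq_true, if_false]
        rcases h2 : (pvSplitSeg (i + 1) rest).2 with _ | ⟨b, t⟩ <;>
          simp [List.append_assoc, List.length_cons, Nat.add_comm, Nat.add_assoc]
      · -- boundary: close `cur`, open a fresh segment [a]
        simp only [List.isEmpty_iff, hc, if_false]
        rw [ih (i + 1) (J.insert name cur) [a] (by simp) (cnt + 1) (pvName (some t) cnt),
          ← pvBuild_cons]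
        conv_rhs => rw [pvBuildCont]
        simp [pvSplitSeg, hb, pvIns]

-- ===== VERDICT (by name: the statement is the Claim_ definition above) =====
theorem extract_user_journeys_py_spec : Claim_equal_extract_user_journeys_py := by
  intro action_history _
  unfold Spec_extract_user_journeys_py extract_user_journeys_py extract_user_journeys_py_alt
  rcases action_history with _ | ⟨a, rest⟩
  · rfl
  · rcases hb : pvBoundary 0 a with _ | b0
    all_goals {
      rw [pvLoopA_cons]
      simp only [hb, List.isEmpty_nil, if_true, List.nil_append, Nat.zero_add]
      rw [pvLoop_eq_foldl rest 1 PySem.Dict.empty [a] (by simp), ← pvBuild_cons]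
      rfl }
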